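-- pv_equiv track=rewrite | github.com/LongPML/CS112.L21.KHCL | Project_Unit_Test/Tao_Check_Test/N06/Tao.py | Tao_Solve1
-- ===== SOURCE A (Python) =====
-- def Tao_Solve1(n, k):
--     f0 = 0
--     f1 = 0
--     fk = 1
--     Mod = 1000000007
--     for _ in range(2, 2*k + 2):
--         f0=f1
--         f1=fk
--         fk= (f0 + f1) % Mod
--     return (fk*n)%Mod
-- ===== SOURCE B (Python) =====
-- def _fib_pair(m, M):
--     # returns (F(m) % M, F(m+1) % M) by fast doubling
--     if m == 0:
--         return (0, 1)
--     a, b = _fib_pair(m // 2, M)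
--     c = (a * (2 * b - a)) % M
--     d = (a * a + b * b) % M
--     if m % 2 == 1:
--         return (d, (c + d) % M)
--     return (c, d)
--
-- def Tao_Solve1(n, k):
--     M = 1000000007
--     t = max(2 * k + 1, 1)
--     a, _ = _fib_pair(t, M)
--     return (a * n) % M
-- ===== Notes on version B (the rewrite author's own statement) =====
-- stated objective: faster
-- what changed: replaces the O(k) iterative Fibonacci loop by O(log k) fast doubling mod 1000000007 (A returns F(max(2k,0)+1)*n mod M)
import Mathlib
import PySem

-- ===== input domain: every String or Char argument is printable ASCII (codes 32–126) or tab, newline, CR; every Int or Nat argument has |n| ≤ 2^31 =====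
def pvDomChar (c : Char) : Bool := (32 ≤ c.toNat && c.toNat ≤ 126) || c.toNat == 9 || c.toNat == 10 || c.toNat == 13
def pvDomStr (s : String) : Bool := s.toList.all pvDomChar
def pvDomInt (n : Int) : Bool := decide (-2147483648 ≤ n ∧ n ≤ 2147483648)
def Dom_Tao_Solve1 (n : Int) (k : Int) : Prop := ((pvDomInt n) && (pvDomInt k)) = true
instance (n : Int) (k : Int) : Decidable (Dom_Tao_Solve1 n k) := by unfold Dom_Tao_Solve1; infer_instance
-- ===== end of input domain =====

-- B replaces A's O(k) iterative Fibonacci loop by O(log k) fast doubling mod 1000000007; same return value for all inputs.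

-- ===== PORT A =====
def Tao_Solve1 (n : Int) (k : Int) : Int :=
  let Mod : Int := 1000000007
  let st :=
    (PySem.List.pyRange 2 (2*k + 2) 1).foldl
      (fun (st : Int × Int × Int) _ =>
        let f0 := st.2.1
        let f1 := st.2.2
        let fk := PySem.Int.mod (f0 + f1) Mod
        (f0, f1, fk))
      (0, 0, 1)
  PySem.Int.mod (st.2.2 * n) Mod

-- ===== PORT B =====
-- fast doubling: returns (F(m) % M, F(m+1) % M)
def fibPair (M : Int) : Nat → Int × Int
  | 0 => (0, 1)
  | (m+1) =>
    let p := fibPair M ((m+1) / 2)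
    let a := p.1
    let b := p.2
    let c := PySem.Int.mod (a * (2*b - a)) M
    let d := PySem.Int.mod (a*a + b*b) M
    if (m+1) % 2 = 1 then (d, PySem.Int.mod (c + d) M) else (c, d)
decreasing_by omega

def Tao_Solve1_alt (n : Int) (k : Int) : Int :=
  let M : Int := 1000000007
  let t := max (2*k + 1) 1
  let p := fibPair M t.toNat
  PySem.Int.mod (p.1 * n) M

-- ===== PRECONDITION & SPEC =====
def Spec_Tao_Solve1 (n : Int) (k : Int) (out : Int) : Prop := out = Tao_Solve1_alt n k
instance (n : Int) (k : Int) (out : Int) : Decidable (Spec_Tao_Solve1 n k out) := by unfold Spec_Tao_Solve1; infer_instance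

-- ===== CLAIM (what is proved, stated in full; the proofs are below) =====
def Claim_equal_Tao_Solve1 : Prop := ∀ (n : Int) (k : Int), Dom_Tao_Solve1 n k → Spec_Tao_Solve1 n k (Tao_Solve1 n k)

-- ===== LEMMAS AND PROOFS =====

-- folding a function that ignores the list elements is iteration by the length
theorem foldl_const_iterate {α β : Type} (g : α → α) :
    ∀ (l : List β) (init : α), l.foldl (fun s _ => g s) init = g^[l.length] init := by
  intro l
  induction l with
  | nil => intro init; simp
  | cons x xs ih =>
      intro init
      simp [List.foldl_cons, ih, Function.iterate_succ_apply]

theorem emod_self_modEq (x M : Int) : x % M ≡ x [ZMOD M] :=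
  Int.emod_emod_of_dvd x (dvd_refl M)

-- Int-cast versions of the fast-doubling identities
theorem fib_two_mul_int (h : Nat) :
    ((Nat.fib (2*h) : Int)) = (Nat.fib h : Int) * (2 * (Nat.fib (h+1) : Int) - (Nat.fib h : Int)) := by
  have hle : Nat.fib h ≤ 2 * Nat.fib (h+1) :=
    le_trans (Nat.fib_le_fib_succ) (by omega)
  have := Nat.fib_two_mul h
  zify [hle] at this
  linarith [this]

theorem fib_two_mul_add_one_int (h : Nat) :
    ((Nat.fib (2*h+1) : Int)) = (Nat.fib h : Int) * (Nat.fib h : Int) + (Nat.fib (h+1) : Int) * (Nat.fib (h+1) : Int) := by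
  have := Nat.fib_two_mul_add_one h
  zify at this
  rw [this]; ring

theorem fib_add_two_int (t : Nat) :
    ((Nat.fib (t+2) : Int)) = (Nat.fib t : Int) + (Nat.fib (t+1) : Int) := by
  have : Nat.fib (t+2) = Nat.fib t + Nat.fib (t+1) := Nat.fib_add_two
  rw [this]; push_cast; ring

-- fast doubling is correct modulo M = 1000000007
theorem fibPair_eq (m : Nat) :
    fibPair 1000000007 m = ((Nat.fib m : Int) % 1000000007, (Nat.fib (m+1) : Int) % 1000000007) := by
  induction m using Nat.strong_induction_on with
  | _ m ih =>
    match m with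
    | 0 => simp [fibPair]
    | (m+1) =>
      have hlt : (m+1)/2 < m+1 := by omega
      have hrec := ih ((m+1)/2) hlt
      have hmod : ∀ a : Int, PySem.Int.mod a 1000000007 = a % 1000000007 := fun a =>
        PySem.Int.mod_eq_emod_of_pos (by norm_num)
      rw [fibPair]
      simp only [hrec, hmod]
      set q := (m+1)/2 with hq
      set F : Int := (Nat.fib q : Int) with hF
      set G : Int := (Nat.fib (q+1) : Int) with hG
      have hc : (F % 1000000007 * (2 * (G % 1000000007) - F % 1000000007)) % 1000000007
          = (Nat.fib (2*q) : Int) % 1000000007 := by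
        rw [fib_two_mul_int q, ← hF, ← hG]
        exact (emod_self_modEq F 1000000007).mul
          (((emod_self_modEq G 1000000007).mul_left 2).sub (emod_self_modEq F 1000000007))
      have hd : (F % 1000000007 * (F % 1000000007) + G % 1000000007 * (G % 1000000007)) % 1000000007
          = (Nat.fib (2*q+1) : Int) % 1000000007 := by
        rw [fib_two_mul_add_one_int q, ← hF, ← hG]
        exact ((emod_self_modEq F 1000000007).mul (emod_self_modEq F 1000000007)).add
          ((emod_self_modEq G 1000000007).mul (emod_self_modEq G 1000000007))
      rcases Nat.even_or_odd (m+1) with he | ho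
      · -- m+1 = 2q
        obtain ⟨j, hj⟩ := he
        have h2 : m + 1 = 2 * q := by omega
        have hpar : ¬ ((m+1) % 2 = 1) := by omega
        simp only [if_neg hpar]
        rw [h2, hc, hd]
      · -- m+1 = 2q+1
        obtain ⟨j, hj⟩ := ho
        have h2 : m + 1 = 2 * q + 1 := by omega
        have hpar : (m+1) % 2 = 1 := by omega
        simp only [if_pos hpar]
        rw [h2, hc, hd]
        refine Prod.ext rfl ?_
        show ((Nat.fib (2*q) : Int) % 1000000007 + (Nat.fib (2*q+1) : Int) % 1000000007) % 1000000007
          = (Nat.fib (2*q+1+1) : Int) % 1000000007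
        rw [show 2*q+1+1 = 2*q+2 from rfl, fib_add_two_int (2*q)]
        exact (emod_self_modEq _ 1000000007).add (emod_self_modEq _ 1000000007)

-- A's loop invariant: after t steps the state's last two components are (F(t) % M, F(t+1) % M)
theorem iterA_eq (t : Nat) :
    ((fun (st : Int × Int × Int) =>
        (st.2.1, st.2.2, PySem.Int.mod (st.2.1 + st.2.2) 1000000007))^[t] (0, 0, 1)).2
      = ((Nat.fib t : Int) % 1000000007, (Nat.fib (t+1) : Int) % 1000000007) := by
  induction t with
  | zero => simp
  | succ t ih =>
      rw [Function.iterate_succ_apply']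
      have h1 : ((fun (st : Int × Int × Int) =>
          (st.2.1, st.2.2, PySem.Int.mod (st.2.1 + st.2.2) 1000000007))^[t] (0, 0, 1)).2.1
          = (Nat.fib t : Int) % 1000000007 := by rw [ih]
      have h2 : ((fun (st : Int × Int × Int) =>
          (st.2.1, st.2.2, PySem.Int.mod (st.2.1 + st.2.2) 1000000007))^[t] (0, 0, 1)).2.2
          = (Nat.fib (t+1) : Int) % 1000000007 := by rw [ih]
      simp only [h1, h2]
      refine Prod.ext rfl ?_
      show PySem.Int.mod _ 1000000007 = _
      rw [PySem.Int.mod_eq_emod_of_pos (by norm_num), fib_add_two_int t]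
      exact (emod_self_modEq _ 1000000007).add (emod_self_modEq _ 1000000007)

-- ===== VERDICT (by name: the statement is the Claim_ definition above) =====
theorem Tao_Solve1_spec : Claim_equal_Tao_Solve1 := by
  intro n k _
  unfold Spec_Tao_Solve1 Tao_Solve1 Tao_Solve1_alt
  simp only
  rw [foldl_const_iterate, PySem.List.length_pyRange_one]
  have hlen : (2*k + 2 - 2).toNat = (2*k).toNat := by omega
  rw [hlen, iterA_eq]
  have ht : (max (2*k + 1) 1).toNat = (2*k).toNat + 1 := by omega
  rw [ht, fibPair_eq]
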